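-- pv_equiv track=rewrite | github.com/CAG2Mark/aoc-2025 | day10/p1.py | solve
-- ===== SOURCE A (Python) =====
-- from typing import List
--
-- def count(cur: list[bool], idx: int, buts) -> tuple[int, bool]:
--   if idx == len(buts):
--     return (0,all(not x for x in cur))
--   ans = []
--   a, good = count(cur, idx + 1, buts)
--   if good: ans.append(a)
--   s = cur.copy()
--   for i in buts[idx]:
--     s[i] = not s[i]
--   b, good = count(s, idx + 1, buts)
--   if good: ans.append(b + 1)
--   if not ans: return (0, False)
--   return (min(ans), True)
--
-- def solve(inp: List[str]):
--   tot = 0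
--   for i, ln in enumerate(inp):
--     ln = ln.split(" ")
--     cur = ln[0][1:-1]
--     cur = [x == '#' for x in cur]
--     buts = ln[1:-1]
--     jolts = ln[-1]
--     buts = [x[1:-1] for x in buts]
--     buts = [tuple(int(x) for x in y.split(",")) for y in buts]
--     res, good = count(cur, 0, buts)
--     if good: tot += res
--   return tot
-- ===== SOURCE B (Python) =====
-- def solve(inp):
--     tot = 0
--     for ln in inp:
--         parts = ln.split(" ")
--         lights = tuple(c == '#' for c in parts[0][1:-1])
--         n = len(lights)
--         # each button as a length-n toggle vector
--         masks = []
--         for tok in parts[1:-1]: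
--             m = [False] * n
--             for piece in tok[1:-1].split(","):
--                 i = int(piece)
--                 m[i] = not m[i]
--             masks.append(tuple(m))
--         # DP over reachable XOR states: state -> min number of presses
--         d = {(False,) * n: 0}
--         for bm in masks:
--             nd = dict(d)
--             for state, c in d.items():
--                 ns = tuple(a != b for a, b in zip(state, bm))
--                 if ns not in nd or c + 1 < nd[ns]:
--                     nd[ns] = c + 1
--             d = nd
--         if lights in d:
--             tot += d[lights]
--     return tot
-- ===== Notes on version B (the rewrite author's own statement) =====
-- stated objective: alternative
-- what changed: A's recursive enumeration of all 2^k button subsets is replaced by a dynamic program over a dict of reachable toggle states (state -> minimal press count), a different algorithm of comparable measured cost on the generated inputs.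
import Mathlib
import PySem

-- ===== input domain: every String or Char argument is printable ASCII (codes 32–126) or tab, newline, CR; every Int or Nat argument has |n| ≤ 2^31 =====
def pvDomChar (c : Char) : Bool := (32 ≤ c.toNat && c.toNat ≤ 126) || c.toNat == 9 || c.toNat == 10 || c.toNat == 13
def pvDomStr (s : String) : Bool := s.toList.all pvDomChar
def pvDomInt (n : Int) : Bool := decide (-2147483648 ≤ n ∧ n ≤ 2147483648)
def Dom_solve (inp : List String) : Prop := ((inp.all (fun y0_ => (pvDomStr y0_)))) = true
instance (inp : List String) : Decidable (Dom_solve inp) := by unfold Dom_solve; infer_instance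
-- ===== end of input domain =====

-- B replaces A's exponential recursion over all button subsets by a dynamic program over reachable
-- toggle states (dict state -> min presses), equal on every input where A returns (objective: alternative).

-- ===== PORT A =====
-- s[i] = not s[i]  (Python list index: negative wraps, out of range raises -> excluded by Pre_;
-- pySetD/pyGetD are the total forms, exact for in-range indices incl. negative)
def pvToggle (s : List Bool) (i : Int) : List Bool :=
  PySem.List.pySetD s i (!(PySem.List.pyGetD s i false))

-- literal port of A's `count`
def pvCount (cur : List Bool) (idx : Nat) (buts : List (List Int)) : Int × Bool :=
  if h : buts.length ≤ idx then
    (0, cur.all (fun x => !x))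
  else
    let r1 := pvCount cur (idx + 1) buts
    let ans1 : List Int := if r1.2 then [r1.1] else []
    let s := (buts[idx]'(by omega)).foldl pvToggle cur
    let r2 := pvCount s (idx + 1) buts
    let ans := ans1 ++ (if r2.2 then [r2.1 + 1] else [])
    match PySem.List.min? ans (fun x => x) with
    | none => (0, false)
    | some m => (m, true)
termination_by buts.length - idx

def solve (inp : List String) : Int :=
  inp.foldl (fun tot ln =>
    let lnp := (PySem.Str.split? ln " ").getD []          -- sep " " ≠ "": split? never none
    let cur := (PySem.Str.slice (PySem.List.pyGetD lnp 0 "") (some 1) (some (-1))).toList.map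
      (fun c => c == '#')
    let buts := PySem.List.slice lnp (some 1) (some (-1))
    -- jolts = ln[-1] is bound but never used by A
    let butsI := buts.map (fun y =>
      ((PySem.Str.split? (PySem.Str.slice y (some 1) (some (-1))) ",").getD []).map
        (fun x => (PySem.Int.ofStr? x).getD 0))            -- int(x); none (ValueError) excluded by Pre_
    let r := pvCount cur 0 butsI
    if r.2 then tot + r.1 else tot) 0

-- ===== PORT B =====
-- tuple(a != b for a, b in zip(state, bm))
def pvVxor (a b : List Bool) : List Bool := List.zipWith (fun x y => x != y) a b

-- one DP relaxation round: nd = dict(d); for state, c in d.items(): ...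
def pvStep (bm : List Bool) (d : PySem.Dict (List Bool) Int) : PySem.Dict (List Bool) Int :=
  d.items.foldl (fun nd p =>
    let ns := pvVxor p.1 bm
    if nd.contains ns = false || p.2 + 1 < nd.getD ns 0 then nd.insert ns (p.2 + 1) else nd) d

def solve_alt (inp : List String) : Int :=
  inp.foldl (fun tot ln =>
    let parts := (PySem.Str.split? ln " ").getD []
    let lights := (PySem.Str.slice (PySem.List.pyGetD parts 0 "") (some 1) (some (-1))).toList.map
      (fun c => c == '#')
    let n := lights.length
    let masks := (PySem.List.slice parts (some 1) (some (-1))).map (fun tok =>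
      (((PySem.Str.split? (PySem.Str.slice tok (some 1) (some (-1))) ",").getD []).map
        (fun p => (PySem.Int.ofStr? p).getD 0)).foldl pvToggle (List.replicate n false))
    let d := masks.foldl (fun d bm => pvStep bm d)
      (PySem.Dict.ofList [(List.replicate n false, 0)])
    if d.contains lights then tot + d.getD lights 0 else tot) 0

-- ===== PRECONDITION & SPEC =====
-- Pre_ excludes exactly the lines on which A raises: a button entry whose piece is not int-parseable
-- (ValueError) or whose index is outside [-n, n) for the n lights (IndexError in `s[i] = not s[i]`).
def Pre_solve (inp : List String) : Prop :=
  ∀ ln ∈ inp,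
    let lnp := (PySem.Str.split? ln " ").getD []
    let n := (PySem.Str.slice (PySem.List.pyGetD lnp 0 "") (some 1) (some (-1))).toList.length
    ∀ tok ∈ PySem.List.slice lnp (some 1) (some (-1)),
      ∀ p ∈ (PySem.Str.split? (PySem.Str.slice tok (some 1) (some (-1))) ",").getD [],
        ((PySem.Int.ofStr? p).any (fun i => decide (-(n : Int) ≤ i ∧ i < n))) = true
instance (inp : List String) : Decidable (Pre_solve inp) := by unfold Pre_solve; infer_instance

def pvWitness_solve : List String := ["[##] (0) (1) (0,1) {3}"]

def Spec_solve (inp : List String) (out : Int) : Prop := out = solve_alt inp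
instance (inp : List String) (out : Int) : Decidable (Spec_solve inp out) := by unfold Spec_solve; infer_instance

-- ===== CLAIM (what is proved, stated in full; the proofs are below) =====
def Claim_equal_solve : Prop := ∀ (inp : List String), Dom_solve inp → Pre_solve inp → Spec_solve inp (solve inp)

-- ===== LEMMAS AND PROOFS =====

-- minimum over Options (Python's filtered min over candidate press counts)
def pvOmin : Option Int → Option Int → Option Int
  | none, b => b
  | some a, none => some a
  | some a, some b => some (min a b)

-- specification value: minimal presses among subsets of `vs` whose combined toggle equals `t`
def pvMp : List (List Bool) → List Bool → Option Int
  | [], t => if t.all (fun x => !x) then some 0 else none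
  | v :: vs, t => pvOmin (pvMp vs t) ((pvMp vs (pvVxor t v)).map (· + 1))

def pvEnc : Option Int → Int × Bool
  | none => (0, false)
  | some m => (m, true)

theorem pvLength_toggle (s : List Bool) (i : Int) : (pvToggle s i).length = s.length := by
  simp [pvToggle, PySem.List.length_pySetD]

theorem pvLength_foldl_toggle (l : List Int) (s : List Bool) :
    (l.foldl pvToggle s).length = s.length := by
  induction l generalizing s with
  | nil => rfl
  | cons i t ih => simp [List.foldl_cons, ih, pvLength_toggle]

theorem pvLength_vxor (a b : List Bool) : (pvVxor a b).length = min a.length b.length := by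
  simp [pvVxor]

theorem pvVxor_replicate_false (s : List Bool) : pvVxor s (List.replicate s.length false) = s := by
  induction s with
  | nil => rfl
  | cons x t ih => simp [pvVxor, List.replicate_succ] at ih ⊢; exact ih

theorem pvVxor_right_comm (t v b : List Bool) :
    pvVxor (pvVxor t v) b = pvVxor (pvVxor t b) v := by
  induction t generalizing v b with
  | nil => simp [pvVxor]
  | cons x xs ih =>
    cases v with
    | nil => simp [pvVxor]
    | cons y ys =>
      cases b with
      | nil => simp [pvVxor]
      | cons z zs =>
        simp [pvVxor] at ih ⊢
        exact ⟨by cases x <;> cases y <;> cases z <;> rfl, ih ys zs⟩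

theorem pvVxor_invol (x bm : List Bool) (h : x.length ≤ bm.length) :
    pvVxor (pvVxor x bm) bm = x := by
  induction x generalizing bm with
  | nil => simp [pvVxor]
  | cons a xs ih =>
    cases bm with
    | nil => simp at h
    | cons z zs =>
      simp [pvVxor] at ih ⊢
      exact ih zs (by simpa using h)

theorem pvIdx_lt (n : Nat) (i : Int) (k : Nat) (h : PySem.List.pyIdx? n i = some k) : k < n := by
  unfold PySem.List.pyIdx? at h
  split_ifs at h <;> simp_all <;> omega

theorem pvToggle_vxor (s z : List Bool) (i : Int) (h : s.length = z.length) :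
    pvToggle (pvVxor s z) i = pvVxor s (pvToggle z i) := by
  have hlen : (pvVxor s z).length = z.length := by simp [pvVxor, h]
  unfold pvToggle PySem.List.pySetD PySem.List.pySet? PySem.List.pyGetD PySem.List.pyGet?
  rw [hlen]
  cases hj : PySem.List.pyIdx? z.length i with
  | none => simp [pvVxor]
  | some k =>
    have hk : k < z.length := pvIdx_lt _ _ _ hj
    simp only [Option.map_some, Option.bind_some, Option.getD_some]
    have h1 : (pvVxor s z)[k]?.getD false = ((s[k]'(by omega)) != (z[k]'hk)) := by
      simp [pvVxor, hk, h]
    have h2 : z[k]?.getD false = z[k]'hk := by simp [hk]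
    rw [h1, h2]
    apply List.ext_getElem
    · simp [pvVxor, h]
    · intro j hj1 hj2
      by_cases hjk : j = k
      · subst hjk
        simp [pvVxor, List.getElem_zipWith]
      · simp only [pvVxor, List.getElem_set, List.getElem_zipWith]
        rw [if_neg (fun hc => hjk hc.symm), if_neg (fun hc => hjk hc.symm)]

theorem pvFoldl_toggle_vxor (l : List Int) (s z : List Bool) (h : s.length = z.length) :
    l.foldl pvToggle (pvVxor s z) = pvVxor s (l.foldl pvToggle z) := by
  induction l generalizing z with
  | nil => rfl
  | cons i t ih =>
    simp only [List.foldl_cons]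
    rw [pvToggle_vxor s z i h, ih (pvToggle z i) (by simp [pvToggle, PySem.List.length_pySetD, h])]

theorem pvFoldl_toggle_eq (l : List Int) (s : List Bool) :
    l.foldl pvToggle s = pvVxor s (l.foldl pvToggle (List.replicate s.length false)) := by
  conv_lhs => rw [← pvVxor_replicate_false s]
  rw [pvFoldl_toggle_vxor l s (List.replicate s.length false) (by simp)]

theorem pvOmin_comm (a b : Option Int) : pvOmin a b = pvOmin b a := by
  cases a <;> cases b <;> simp [pvOmin, min_comm]

theorem pvOmin_assoc (a b c : Option Int) : pvOmin (pvOmin a b) c = pvOmin a (pvOmin b c) := by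
  cases a <;> cases b <;> cases c <;> simp [pvOmin, min_assoc]

theorem pvOmin_none_right (a : Option Int) : pvOmin a none = a := by cases a <;> rfl

theorem pvOmin_map_succ (a b : Option Int) :
    (pvOmin a b).map (· + 1) = pvOmin (a.map (· + 1)) (b.map (· + 1)) := by
  cases a <;> cases b <;> simp [pvOmin] <;> omega

theorem pvMp_append (vs : List (List Bool)) (b t : List Bool) :
    pvMp (vs ++ [b]) t = pvOmin (pvMp vs t) ((pvMp vs (pvVxor t b)).map (· + 1)) := by
  induction vs generalizing t with
  | nil => rfl
  | cons v vs ih =>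
    show pvMp (v :: (vs ++ [b])) t = _
    rw [pvMp, ih, ih, pvMp, pvMp, pvVxor_right_comm t v b]
    rw [pvOmin_map_succ]
    rw [pvOmin_assoc, pvOmin_assoc]
    congr 1
    rw [pvOmin_map_succ, ← pvOmin_assoc, ← pvOmin_assoc,
      pvOmin_comm ((pvMp vs (pvVxor t b)).map (· + 1))]

theorem pvCombine (a b : Option Int) :
    (match PySem.List.min?
        ((if (pvEnc a).2 then [(pvEnc a).1] else []) ++
         (if (pvEnc b).2 then [(pvEnc b).1 + 1] else [])) (fun x => x) with
      | none => ((0 : Int), false)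
      | some m => (m, true)) = pvEnc (pvOmin a (b.map (· + 1))) := by
  cases a <;> cases b <;>
    simp [pvEnc, pvOmin, PySem.List.min?, List.foldl] <;>
    split_ifs <;> simp <;> omega

theorem pvAll_not_iff (x : List Bool) :
    x.all (fun b => !b) = true ↔ x = List.replicate x.length false := by
  induction x with
  | nil => simp
  | cons a t ih => cases a <;> simp [List.replicate_succ, ih]

theorem pvCount_char (k : Nat) : ∀ (idx : Nat) (buts : List (List Int)) (cur : List Bool),
    buts.length ≤ idx + k →
    pvCount cur idx buts =
      pvEnc (pvMp ((buts.drop idx).map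
        (fun b => b.foldl pvToggle (List.replicate cur.length false))) cur) := by
  induction k with
  | zero =>
    intro idx buts cur h
    rw [pvCount, dif_pos (by omega), List.drop_of_length_le (by omega)]
    simp only [List.map_nil, pvMp]
    by_cases hall : cur.all (fun x => !x) = true
    · simp [hall, pvEnc]
    · simp [hall, pvEnc]
  | succ m ih =>
    intro idx buts cur h
    by_cases hb : buts.length ≤ idx
    · rw [pvCount, dif_pos hb, List.drop_of_length_le (by omega)]
      simp only [List.map_nil, pvMp]
      by_cases hall : cur.all (fun x => !x) = true
      · simp [hall, pvEnc]
      · simp [hall, pvEnc]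
    · rw [pvCount, dif_neg hb]
      simp only
      have hidx : idx < buts.length := by omega
      have hdrop : buts.drop idx = buts[idx] :: buts.drop (idx + 1) :=
        List.drop_eq_getElem_cons hidx
      set b0 := buts[idx]'hidx with hb0
      set s := b0.foldl pvToggle cur with hs
      have hslen : s.length = cur.length := pvLength_foldl_toggle _ _
      have h1 : pvCount cur (idx + 1) buts =
          pvEnc (pvMp ((buts.drop (idx+1)).map
            (fun b => b.foldl pvToggle (List.replicate cur.length false))) cur) :=
        ih (idx+1) buts cur (by omega)
      have h2 : pvCount s (idx + 1) buts =
          pvEnc (pvMp ((buts.drop (idx+1)).map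
            (fun b => b.foldl pvToggle (List.replicate cur.length false)))
            (pvVxor cur (b0.foldl pvToggle (List.replicate cur.length false)))) := by
        rw [ih (idx+1) buts s (by omega), hslen]
        rw [hs, pvFoldl_toggle_eq b0 cur]
      rw [h1, h2, hdrop]
      simp only [List.map_cons]
      rw [pvMp]
      exact pvCombine _ _

theorem pvFstep_get (bm : List Bool) (nd : PySem.Dict (List Bool) Int) (p : List Bool × Int)
    (x : List Bool) (hpk : pvVxor p.1 bm = x) :
    ((fun nd (p : List Bool × Int) =>
      let ns := pvVxor p.1 bm
      if nd.contains ns = false || p.2 + 1 < nd.getD ns 0 then nd.insert ns (p.2 + 1) else nd) nd p).get? x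
      = pvOmin (nd.get? x) (some (p.2 + 1)) := by
  simp only [hpk]
  cases hg : nd.get? x with
  | none =>
    have hc : nd.contains x = false := by rw [PySem.Dict.contains_eq_isSome_get?, hg]; rfl
    simp [hc, PySem.Dict.get?_insert_self, pvOmin]
  | some c =>
    have hc : nd.contains x = true := by rw [PySem.Dict.contains_eq_isSome_get?, hg]; rfl
    have hd : nd.getD x 0 = c := by rw [PySem.Dict.getD_eq_get?_getD, hg]; rfl
    simp only [hc, hd]
    by_cases hlt : p.2 + 1 < c
    · have hm : min c (p.2 + 1) = p.2 + 1 := by omega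
      simp [hlt, PySem.Dict.get?_insert_self, pvOmin, hm]
    · have hm : min c (p.2 + 1) = c := by omega
      simp [hlt, pvOmin, hg, hm]

theorem pvFoldRelax (n : Nat) (bm x : List Bool) (hbm : bm.length = n) (hx : x.length = n) :
    ∀ (L : List (List Bool × Int)) (nd : PySem.Dict (List Bool) Int),
    (L.map Prod.fst).Nodup → (∀ p ∈ L, p.1.length = n) →
    (L.foldl (fun nd p =>
      let ns := pvVxor p.1 bm
      if nd.contains ns = false || p.2 + 1 < nd.getD ns 0 then nd.insert ns (p.2 + 1) else nd) nd).get? x =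
      pvOmin (nd.get? x) ((L.find? (fun p => p.1 == pvVxor x bm)).map (fun p => p.2 + 1)) := by
  intro L
  induction L with
  | nil => intro nd _ _; simp [pvOmin_none_right]
  | cons p rest ih =>
    intro nd hnd hlen
    simp only [List.foldl_cons]
    by_cases hpk : p.1 = pvVxor x bm
    · have hns : pvVxor p.1 bm = x := by rw [hpk]; exact pvVxor_invol x bm (by omega)
      rw [List.map_cons, List.nodup_cons] at hnd
      have hfind : rest.find? (fun q => q.1 == pvVxor x bm) = none := by
        rw [List.find?_eq_none]
        intro q hq
        simp only [beq_iff_eq]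
        intro hq1
        exact hnd.1 (by rw [hpk, ← hq1]; exact List.mem_map_of_mem (f := Prod.fst) hq)
      rw [ih _ hnd.2 (fun q hq => hlen q (by simp [hq])), hfind]
      simp only [Option.map_none]
      rw [pvOmin_none_right]
      rw [List.find?_cons_of_pos (by simpa using hpk)]
      simpa using pvFstep_get bm nd p x hns
    · have hns : pvVxor p.1 bm ≠ x := by
        intro hc
        exact hpk (by rw [← hc, pvVxor_invol p.1 bm (by rw [hlen p (by simp), hbm])])
      have hstep : ((fun nd (p : List Bool × Int) =>
          let ns := pvVxor p.1 bm
          if nd.contains ns = false || p.2 + 1 < nd.getD ns 0 then nd.insert ns (p.2 + 1) else nd) nd p).get? x = nd.get? x := by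
        simp only
        split_ifs with hcond
        · exact PySem.Dict.get?_insert_of_ne _ _ (fun hc => hns hc.symm)
        · rfl
      rw [List.map_cons, List.nodup_cons] at hnd
      rw [ih _ hnd.2 (fun q hq => hlen q (by simp [hq])), hstep]
      rw [List.find?_cons_of_neg (by simpa using hpk)]

theorem pvStep_get (n : Nat) (bm : List Bool) (hbm : bm.length = n)
    (d : PySem.Dict (List Bool) Int) (hnd : d.keys.Nodup)
    (hlen : ∀ k ∈ d.keys, k.length = n) (x : List Bool) (hx : x.length = n) :
    (pvStep bm d).get? x = pvOmin (d.get? x) ((d.get? (pvVxor x bm)).map (· + 1)) := by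
  unfold pvStep
  rw [pvFoldRelax n bm x hbm hx d.items d hnd
    (fun p hp => hlen p.1 (PySem.Dict.mem_keys_of_mem_items _ hp))]
  congr 1
  show _ = (((d.items.find? (fun p => p.1 == pvVxor x bm)).map (fun p => p.2)).map (· + 1))
  rw [Option.map_map]
  rfl

theorem pvStep_keys (n : Nat) (bm : List Bool) (hbm : bm.length = n)
    (d : PySem.Dict (List Bool) Int) (hnd : d.keys.Nodup)
    (hlen : ∀ k ∈ d.keys, k.length = n) :
    (pvStep bm d).keys.Nodup ∧ ∀ k ∈ (pvStep bm d).keys, k.length = n := by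
  unfold pvStep
  have main : ∀ (L : List (List Bool × Int)) (nd : PySem.Dict (List Bool) Int),
      (∀ p ∈ L, p.1.length = n) → nd.keys.Nodup → (∀ k ∈ nd.keys, k.length = n) →
      (L.foldl (fun nd p =>
        let ns := pvVxor p.1 bm
        if nd.contains ns = false || p.2 + 1 < nd.getD ns 0 then nd.insert ns (p.2 + 1) else nd) nd).keys.Nodup ∧
      ∀ k ∈ (L.foldl (fun nd p =>
        let ns := pvVxor p.1 bm
        if nd.contains ns = false || p.2 + 1 < nd.getD ns 0 then nd.insert ns (p.2 + 1) else nd) nd).keys, k.length = n := by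
    intro L
    induction L with
    | nil => intro nd _ h1 h2; exact ⟨h1, h2⟩
    | cons p rest ih =>
      intro nd hL h1 h2
      simp only [List.foldl_cons]
      apply ih
      · intro q hq; exact hL q (by simp [hq])
      · split_ifs
        · exact PySem.Dict.nodup_keys_insert _ _ _ h1
        · exact h1
      · split_ifs
        · intro k hk
          rcases (PySem.Dict.mem_keys_insert _ _ _ _).mp hk with h | h
          · rw [h, pvLength_vxor, hL p (by simp), hbm]; omega
          · exact h2 k h
        · exact h2
  exact main d.items d (fun p hp => hlen p.1 (PySem.Dict.mem_keys_of_mem_items _ hp)) hnd hlen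

theorem pvDp_get (n : Nat) (masks : List (List Bool)) (h : ∀ m ∈ masks, m.length = n) :
    let D := masks.foldl (fun d bm => pvStep bm d) (PySem.Dict.ofList [(List.replicate n false, 0)])
    D.keys.Nodup ∧ (∀ k ∈ D.keys, k.length = n) ∧
      ∀ x : List Bool, x.length = n → D.get? x = pvMp masks x := by
  have hitems : (PySem.Dict.ofList [(List.replicate n false, (0 : Int))]).items
      = [(List.replicate n false, (0 : Int))] := rfl
  induction masks using List.reverseRecOn with
  | nil =>
    refine ⟨?_, ?_, ?_⟩
    · simp only [List.foldl_nil, PySem.Dict.keys, hitems]; simp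
    · simp only [List.foldl_nil, PySem.Dict.keys, hitems]; simp
    · intro x hx
      simp only [List.foldl_nil, PySem.Dict.get?, hitems]
      rw [pvMp]
      by_cases hz : x = List.replicate n false
      · rw [if_pos (by rw [pvAll_not_iff, hx, hz]), List.find?_cons_of_pos (by simp [hz])]
        rfl
      · rw [if_neg (by rw [pvAll_not_iff, hx]; exact hz),
          List.find?_cons_of_neg (by simp; exact fun hc => hz hc.symm)]
        simp
  | append_singleton P b ih =>
    have hP : ∀ m ∈ P, m.length = n := fun m hm => h m (by simp [hm])
    have hb : b.length = n := h b (by simp)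
    obtain ⟨ih1, ih2, ih3⟩ := ih hP
    simp only [List.foldl_append, List.foldl_cons, List.foldl_nil]
    set D := P.foldl (fun d bm => pvStep bm d) (PySem.Dict.ofList [(List.replicate n false, 0)]) with hD
    obtain ⟨k1, k2⟩ := pvStep_keys n b hb D ih1 ih2
    refine ⟨k1, k2, ?_⟩
    intro x hx
    rw [pvStep_get n b hb D ih1 ih2 x hx]
    rw [ih3 x hx, ih3 (pvVxor x b) (by rw [pvLength_vxor, hx, hb]; omega)]
    rw [pvMp_append]

theorem pvGen (tot : Int) (cur : List Bool) (butsI : List (List Int)) :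
    (let r := pvCount cur 0 butsI
     if r.2 then tot + r.1 else tot) =
    (let masks := butsI.map (fun b => b.foldl pvToggle (List.replicate cur.length false))
     let d := masks.foldl (fun d bm => pvStep bm d)
       (PySem.Dict.ofList [(List.replicate cur.length false, 0)])
     if d.contains cur then tot + d.getD cur 0 else tot) := by
  simp only
  set masks := butsI.map (fun b => b.foldl pvToggle (List.replicate cur.length false)) with hmasks
  have hml : ∀ m ∈ masks, m.length = cur.length := by
    intro m hm
    rw [hmasks] at hm
    obtain ⟨b, _, rfl⟩ := List.mem_map.mp hm
    rw [pvLength_foldl_toggle, List.length_replicate]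
  obtain ⟨_, _, h3⟩ := pvDp_get cur.length masks hml
  have hA : pvCount cur 0 butsI = pvEnc (pvMp masks cur) := by
    have := pvCount_char butsI.length 0 butsI cur (by omega)
    simpa [hmasks] using this
  set d := masks.foldl (fun d bm => pvStep bm d)
    (PySem.Dict.ofList [(List.replicate cur.length false, 0)]) with hd
  have hget : d.get? cur = pvMp masks cur := h3 cur rfl
  have hcont : d.contains cur = (pvMp masks cur).isSome := by
    rw [PySem.Dict.contains_eq_isSome_get?, hget]
  have hgetD : d.getD cur 0 = (pvMp masks cur).getD 0 := by
    rw [PySem.Dict.getD_eq_get?_getD, hget]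
  rw [hA, hcont, hgetD]
  cases pvMp masks cur <;> simp [pvEnc]

theorem pvGen2 (tot : Int) (cur : List Bool) (pf : String → List Int) (butsS : List String) :
    (let r := pvCount cur 0 (butsS.map pf)
     if r.2 then tot + r.1 else tot) =
    (let masks := butsS.map (fun tok => (pf tok).foldl pvToggle (List.replicate cur.length false))
     let d := masks.foldl (fun d bm => pvStep bm d)
       (PySem.Dict.ofList [(List.replicate cur.length false, 0)])
     if d.contains cur then tot + d.getD cur 0 else tot) := by
  have h := pvGen tot cur (butsS.map pf)
  rw [List.map_map] at h
  exact h

theorem pvLine_eq (tot : Int) (ln : String) :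
    (let lnp := (PySem.Str.split? ln " ").getD []
     let cur := (PySem.Str.slice (PySem.List.pyGetD lnp 0 "") (some 1) (some (-1))).toList.map
       (fun c => c == '#')
     let buts := PySem.List.slice lnp (some 1) (some (-1))
     let butsI := buts.map (fun y =>
       ((PySem.Str.split? (PySem.Str.slice y (some 1) (some (-1))) ",").getD []).map
         (fun x => (PySem.Int.ofStr? x).getD 0))
     let r := pvCount cur 0 butsI
     if r.2 then tot + r.1 else tot) =
    (let parts := (PySem.Str.split? ln " ").getD []
     let lights := (PySem.Str.slice (PySem.List.pyGetD parts 0 "") (some 1) (some (-1))).toList.map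
       (fun c => c == '#')
     let n := lights.length
     let masks := (PySem.List.slice parts (some 1) (some (-1))).map (fun tok =>
       (((PySem.Str.split? (PySem.Str.slice tok (some 1) (some (-1))) ",").getD []).map
         (fun p => (PySem.Int.ofStr? p).getD 0)).foldl pvToggle (List.replicate n false))
     let d := masks.foldl (fun d bm => pvStep bm d)
       (PySem.Dict.ofList [(List.replicate n false, 0)])
     if d.contains lights then tot + d.getD lights 0 else tot) := by
  exact pvGen2 tot _ _ _

-- ===== VERDICT (by name: the statement is the Claim_ definition above) =====
theorem solve_spec : Claim_equal_solve := by
  intro inp _ _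
  unfold Spec_solve solve solve_alt
  apply PySem.List.foldl_congr_mem
  intro tot ln _
  exact pvLine_eq tot ln
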